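-- pv_equiv track=rewrite | github.com/plhosk/wordtracer | scripts/bridge_disconnected.py | words_from_wheel
-- ===== SOURCE A (Python) =====
-- def token_text(token: str, mode: str) -> str:
--     if mode == "reverse" and len(token) >= 2:
--         return token[::-1]
--     return token
--
-- def wheel_candidate_words_for_mode(
--     lexicon: set[str],
--     wheel_tokens: list[str],
--     mode: str,
--     min_len: int = 3,
--     max_len: int = 12,
-- ) -> set[str]:
--     found: set[str] = set()
--
--     def walk(current: str, used_mask: int) -> None:
--         if len(current) >= min_len and current in lexicon:
--             found.add(current)
--         if len(current) >= max_len: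
--             return
--
--         for idx, token in enumerate(wheel_tokens):
--             if used_mask & (1 << idx):
--                 continue
--             nxt = current + token_text(token, mode)
--             if len(nxt) > max_len:
--                 continue
--             walk(nxt, used_mask | (1 << idx))
--
--     walk("", 0)
--     return found
--
-- def words_from_wheel(
--     lexicon: set[str], wheel_tokens: list[str], min_len: int = 3, max_len: int = 12
-- ) -> dict[str, set[str]]:
--     result: dict[str, set[str]] = {}
--     for mode in ("forward", "reverse"):
--         words = wheel_candidate_words_for_mode(
--             lexicon,
--             wheel_tokens,
--             mode,
--             min_len=min_len,
--             max_len=max_len,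
--         )
--         for word in words:
--             result.setdefault(word, set()).add(mode)
--     return result
-- ===== SOURCE B (Python) =====
-- def words_from_wheel(lexicon, wheel_tokens, min_len=3, max_len=12):
--     # Prefix-pruned search: precompute every prefix of a lexicon word whose
--     # length lies in [min_len, max_len]; abandon any branch whose string is
--     # not such a prefix (it can never reach a findable word).
--     prefixes = {w[:i]
--                 for w in lexicon if min_len <= len(w) <= max_len
--                 for i in range(len(w) + 1)}
--     per_mode = {}
--     for mode in ("forward", "reverse"):
--         texts = ([t[::-1] if len(t) >= 2 else t for t in wheel_tokens]
--                  if mode == "reverse" else list(wheel_tokens))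
--         found = set()
--
--         def search(current, used):
--             if len(current) >= min_len and current in lexicon:
--                 found.add(current)
--             if len(current) >= max_len:
--                 return
--             for i, text in enumerate(texts):
--                 if i in used:
--                     continue
--                 nxt = current + text
--                 if len(nxt) <= max_len and nxt in prefixes:
--                     search(nxt, used | {i})
--
--         search("", frozenset())
--         per_mode[mode] = found
--     return {w: {m for m in ("forward", "reverse") if w in per_mode[m]}
--             for w in per_mode["forward"] | per_mode["reverse"]}
-- ===== Notes on version B (the rewrite author's own statement) =====
-- stated objective: faster
-- what changed: B precomputes the set of all prefixes of lexicon words whose length fits the [min_len, max_len] window and prunes the permutation DFS at every branch whose string is not such a prefix (also precomputing per-mode token texts and assembling the mode dict from the two found-sets at the end), instead of A's unpruned O(n!)-branch search.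
import Mathlib
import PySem

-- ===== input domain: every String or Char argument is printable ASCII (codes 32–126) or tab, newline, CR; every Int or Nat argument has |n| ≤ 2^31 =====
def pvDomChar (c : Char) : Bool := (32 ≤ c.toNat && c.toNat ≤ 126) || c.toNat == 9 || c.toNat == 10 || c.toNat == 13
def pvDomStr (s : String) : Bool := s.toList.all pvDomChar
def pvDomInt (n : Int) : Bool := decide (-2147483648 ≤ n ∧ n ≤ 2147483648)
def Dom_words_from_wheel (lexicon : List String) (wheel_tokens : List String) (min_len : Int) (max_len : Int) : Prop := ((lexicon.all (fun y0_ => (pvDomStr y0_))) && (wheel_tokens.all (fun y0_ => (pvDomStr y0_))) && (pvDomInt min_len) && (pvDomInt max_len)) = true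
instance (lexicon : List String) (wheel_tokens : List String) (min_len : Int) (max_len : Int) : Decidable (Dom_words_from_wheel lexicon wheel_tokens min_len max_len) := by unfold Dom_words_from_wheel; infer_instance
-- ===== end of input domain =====

-- B prunes the permutation DFS with a precomputed set of lexicon-word prefixes (asymptotically
-- fewer branches) and assembles the mode dict from the two found-sets at the end; return value only
-- (A mutates nothing observable). Python's set/dict iteration orders are not part of the claim
-- (outputs are compared as dicts of sets); both ports use first-insertion order.

-- ===== PORT A =====
-- strings are carried as List Char (PySem convention); token[::-1] on a string is exactly List.reverse
def pvTokenText (mode : String) (t : List Char) : List Char :=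
  if mode == "reverse" ∧ 2 ≤ t.length then t.reverse else t

-- walk(current, used_mask); fuel bounds the recursion depth (each call sets a fresh bit, so
-- depth ≤ |tokens| and the initial fuel |tokens|+1 is never exhausted); the mask is a
-- nonnegative Python int: Nat &&& / ||| / <<< are exact for it
def pvWalkA (lex toks : List (List Char)) (mode : String) (minL maxL : Int) :
    Nat → List Char → Nat → PySem.Set (List Char) → PySem.Set (List Char)
  | 0, _, _, found => found
  | f+1, cur, mask, found =>
    let found1 := if minL ≤ (cur.length : Int) ∧ cur ∈ lex then PySem.Set.add found cur else found
    if maxL ≤ (cur.length : Int) then found1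
    else
      (PySem.List.enumerate toks).foldl
        (fun fnd p =>
          if mask &&& (1 <<< p.1.toNat) ≠ 0 then fnd
          else
            let nxt := cur ++ pvTokenText mode p.2
            if maxL < (nxt.length : Int) then fnd
            else pvWalkA lex toks mode minL maxL f nxt (mask ||| (1 <<< p.1.toNat)) fnd)
        found1

def words_from_wheel (lexicon : List String) (wheel_tokens : List String) (min_len : Int) (max_len : Int) : List (String × List String) :=
  let lex := lexicon.map String.toList
  let toks := wheel_tokens.map String.toList
  let d := (["forward", "reverse"]).foldl
    (fun d mode =>
      (pvWalkA lex toks mode min_len max_len (toks.length + 1) [] 0 []).foldl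
        (fun d w => d.modify w PySem.Set.empty (fun s => PySem.Set.add s mode)) d)
    PySem.Dict.empty
  d.items.map (fun kv => (String.ofList kv.1, kv.2))

-- ===== PORT B =====
-- every prefix (w[:i]) of a lexicon word whose length lies in [min_len, max_len]
def pvPrefixes (lex : List (List Char)) (minL maxL : Int) : PySem.Set (List Char) :=
  lex.foldl (fun s w =>
    if minL ≤ (w.length : Int) ∧ (w.length : Int) ≤ maxL then
      (List.range (w.length + 1)).foldl (fun s i => PySem.Set.add s (w.take i)) s
    else s) []

def pvRevText (t : List Char) : List Char := if 2 ≤ t.length then t.reverse else t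

-- search(current, used): like A's walk but texts are precomputed, used is a frozenset of
-- indices, and a branch is entered only if its string is a viable prefix
def pvSearchB (lex texts : List (List Char)) (prefs : PySem.Set (List Char)) (minL maxL : Int) :
    Nat → List Char → PySem.Set Int → PySem.Set (List Char) → PySem.Set (List Char)
  | 0, _, _, found => found
  | f+1, cur, used, found =>
    let found1 := if minL ≤ (cur.length : Int) ∧ cur ∈ lex then PySem.Set.add found cur else found
    if maxL ≤ (cur.length : Int) then found1
    else
      (PySem.List.enumerate texts).foldl
        (fun fnd p =>
          if PySem.Set.contains used p.1 then fnd
          else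
            let nxt := cur ++ p.2
            if (nxt.length : Int) ≤ maxL ∧ PySem.Set.contains prefs nxt then
              pvSearchB lex texts prefs minL maxL f nxt (PySem.Set.union used [p.1]) fnd
            else fnd)
        found1

def words_from_wheel_alt (lexicon : List String) (wheel_tokens : List String) (min_len : Int) (max_len : Int) : List (String × List String) :=
  let lex := lexicon.map String.toList
  let toks := wheel_tokens.map String.toList
  let prefs := pvPrefixes lex min_len max_len
  let fF := pvSearchB lex toks prefs min_len max_len (toks.length + 1) [] [] []
  let fR := pvSearchB lex (toks.map pvRevText) prefs min_len max_len (toks.length + 1) [] [] []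
  (PySem.Set.union fF fR).map (fun w =>
    (String.ofList w,
      ["forward", "reverse"].filter (fun m =>
        if m == "forward" then fF.contains w else fR.contains w)))

-- ===== PRECONDITION & SPEC =====
def Spec_words_from_wheel (lexicon : List String) (wheel_tokens : List String) (min_len : Int) (max_len : Int) (out : List (String × List String)) : Prop := out = words_from_wheel_alt lexicon wheel_tokens min_len max_len
instance (lexicon : List String) (wheel_tokens : List String) (min_len : Int) (max_len : Int) (out : List (String × List String)) : Decidable (Spec_words_from_wheel lexicon wheel_tokens min_len max_len out) := by unfold Spec_words_from_wheel; infer_instance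

-- ===== CLAIM (what is proved, stated in full; the proofs are below) =====
def Claim_equal_words_from_wheel : Prop := ∀ (lexicon : List String) (wheel_tokens : List String) (min_len : Int) (max_len : Int), Dom_words_from_wheel lexicon wheel_tokens min_len max_len → Spec_words_from_wheel lexicon wheel_tokens min_len max_len (words_from_wheel lexicon wheel_tokens min_len max_len)

-- ===== LEMMAS AND PROOFS =====

-- a string is a "good prefix": some lexicon word in the length window extends it
def pvGood (lex : List (List Char)) (minL maxL : Int) (p : List Char) : Prop :=
  ∃ w ∈ lex, minL ≤ (w.length : Int) ∧ (w.length : Int) ≤ maxL ∧ p <+: w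

theorem pvMem_foldl_add {α β : Type} [BEq β] [LawfulBEq β] (l : List α) (f : α → β)
    (acc : PySem.Set β) (x : β) :
    x ∈ l.foldl (fun s y => PySem.Set.add s (f y)) acc ↔ x ∈ acc ∨ ∃ y ∈ l, x = f y := by
  induction l generalizing acc with
  | nil => simp
  | cons h t ih => simp [ih, PySem.Set.mem_add]; tauto

theorem pvPrefix_iff_take (p w : List Char) :
    p <+: w ↔ ∃ i ∈ List.range (w.length + 1), p = w.take i := by
  constructor
  · intro h
    refine ⟨p.length, List.mem_range.mpr (by have := h.length_le; omega), List.prefix_iff_eq_take.mp h⟩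
  · rintro ⟨i, -, rfl⟩; exact List.take_prefix i w

theorem pvPrefixes_mem (lex : List (List Char)) (minL maxL : Int) (p : List Char) :
    PySem.Set.contains (pvPrefixes lex minL maxL) p = true ↔ pvGood lex minL maxL p := by
  have aux : ∀ acc : PySem.Set (List Char),
      p ∈ lex.foldl (fun s w =>
        if minL ≤ (w.length : Int) ∧ (w.length : Int) ≤ maxL then
          (List.range (w.length + 1)).foldl (fun s i => PySem.Set.add s (w.take i)) s
        else s) acc ↔ p ∈ acc ∨ pvGood lex minL maxL p := by
    induction lex with
    | nil => simp [pvGood]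
    | cons w t ih =>
      intro acc
      simp only [List.foldl_cons]
      by_cases hw : minL ≤ (w.length : Int) ∧ (w.length : Int) ≤ maxL
      · rw [if_pos hw, ih, pvMem_foldl_add]
        constructor
        · rintro (⟨h | ⟨i, hi, rfl⟩⟩ | hg)
          · exact Or.inl h
          · exact Or.inr ⟨w, List.mem_cons_self, hw.1, hw.2, List.take_prefix i w⟩
          · obtain ⟨v, hv, h⟩ := hg; exact Or.inr ⟨v, List.mem_cons_of_mem _ hv, h⟩
        · rintro (h | ⟨v, hv, h1, h2, h3⟩)
          · exact Or.inl (Or.inl h)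
          · rcases List.mem_cons.mp hv with rfl | hv
            · obtain ⟨i, hi, hp⟩ := (pvPrefix_iff_take p v).mp h3
              exact Or.inl (Or.inr ⟨i, hi, hp⟩)
            · exact Or.inr ⟨v, hv, h1, h2, h3⟩
      · rw [if_neg hw, ih]
        constructor
        · rintro (h | ⟨v, hv, hg⟩)
          · exact Or.inl h
          · exact Or.inr ⟨v, List.mem_cons_of_mem _ hv, hg⟩
        · rintro (h | ⟨v, hv, h1, h2, h3⟩)
          · exact Or.inl h
          · rcases List.mem_cons.mp hv with rfl | hv
            · exact absurd ⟨h1, h2⟩ hw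
            · exact Or.inr ⟨v, hv, h1, h2, h3⟩
  rw [PySem.Set.contains, List.contains_iff_mem, pvPrefixes, aux]
  simp

theorem pvWalkA_noop (lex toks : List (List Char)) (mode : String) (minL maxL : Int)
    (f : Nat) (cur : List Char) (mask : Nat) (found : PySem.Set (List Char))
    (hlen : (cur.length : Int) ≤ maxL) (hbad : ¬ pvGood lex minL maxL cur) :
    pvWalkA lex toks mode minL maxL f cur mask found = found := by
  induction f generalizing cur mask found with
  | zero => rfl
  | succ f ih =>
    rw [pvWalkA]
    have hf1 : (if minL ≤ (cur.length : Int) ∧ cur ∈ lex then PySem.Set.add found cur else found) = found := by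
      rw [if_neg]
      rintro ⟨h1, h2⟩
      exact hbad ⟨cur, h2, h1, hlen, List.prefix_refl cur⟩
    simp only [hf1]
    split
    · rfl
    · rename_i hmax
      rw [PySem.List.foldl_congr_mem _ _ (fun fnd _ => fnd) found ?_, PySem.List.foldl_ignore]
      intro acc p _
      dsimp only
      split
      · rfl
      · split
        · rfl
        · rename_i hskip hbig
          apply ih
          · omega
          · intro hg
            obtain ⟨w, hw, h1, h2, h3⟩ := hg
            exact hbad ⟨w, hw, h1, h2, (List.prefix_append cur _).trans h3⟩

theorem pvWalkA_nodup (lex toks : List (List Char)) (mode : String) (minL maxL : Int)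
    (f : Nat) (cur : List Char) (mask : Nat) (found : PySem.Set (List Char))
    (h : found.Nodup) : (pvWalkA lex toks mode minL maxL f cur mask found).Nodup := by
  induction f generalizing cur mask found with
  | zero => exact h
  | succ f ih =>
    rw [pvWalkA]
    have h1 : (if minL ≤ (cur.length : Int) ∧ cur ∈ lex then PySem.Set.add found cur else found).Nodup := by
      split
      · exact PySem.Set.nodup_add found cur h
      · exact h
    split
    · exact h1
    · refine List.foldlRecOn _ _ h1 ?_
      intro b hb p hp
      dsimp only
      split
      · exact hb
      · split
        · exact hb
        · exact ih _ _ _ hb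

theorem pvUnion_eq_append {α : Type} [BEq α] [LawfulBEq α] (s : PySem.Set α) (t : List α)
    (ht : t.Nodup) :
    PySem.Set.union s t = s ++ t.filter (fun x => !s.contains x) := by
  rw [PySem.Set.union, PySem.Set.update]
  induction t generalizing s with
  | nil => simp
  | cons x t ih =>
    obtain ⟨hx, ht'⟩ := List.nodup_cons.mp ht
    simp only [List.foldl_cons, List.filter_cons]
    by_cases hm : x ∈ s
    · have hc : s.contains x = true := List.contains_iff_mem.mpr hm
      rw [PySem.Set.add, if_pos hc]
      simp only [hc, Bool.not_true, if_neg (by simp : ¬(false = true)), ih s ht']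
    · have hc : s.contains x = false := by
        cases h : s.contains x
        · rfl
        · exact absurd (List.contains_iff_mem.mp h) hm
      simp only [PySem.Set.add, hc, Bool.not_false, Bool.false_eq_true, if_false, if_true]
      rw [ih (s ++ [x]) ht']
      have : t.filter (fun y => !(s ++ [x]).contains y) = t.filter (fun y => !s.contains y) := by
        apply List.filter_congr
        intro y hy
        have hyx : y ≠ x := fun h => hx (h ▸ hy)
        simp [hyx]
      rw [this]
      simp

theorem pvFind_of_mem {ν : Type} (l : List (List Char × ν)) (k : List Char) (v : ν)
    (hk : (l.map Prod.fst).Nodup) (hm : (k, v) ∈ l) :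
    l.find? (fun p => p.1 == k) = some (k, v) := by
  induction l with
  | nil => cases hm
  | cons p t ih =>
    rw [List.map_cons, List.nodup_cons] at hk
    obtain ⟨hph, hpt⟩ := hk
    by_cases hpk : p.1 = k
    · rw [List.find?_cons_of_pos (by simp [hpk])]
      rcases List.mem_cons.mp hm with rfl | hmt
      · rfl
      · exact absurd (hpk ▸ List.mem_map_of_mem hmt : p.1 ∈ t.map Prod.fst) hph
    · rw [List.find?_cons_of_neg (by simp [hpk])]
      rcases List.mem_cons.mp hm with rfl | hmt
      · exact absurd rfl hpk
      · exact ih hpt hmt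

theorem pvGetD_of_mem {ν : Type} (d : PySem.Dict (List Char) ν) (k : List Char) (v dflt : ν)
    (hk : (d.items.map Prod.fst).Nodup) (hm : (k, v) ∈ d.items) :
    d.getD k dflt = v := by
  rw [PySem.Dict.getD, PySem.Dict.get?, pvFind_of_mem d.items k v hk hm]
  rfl

theorem pvGetD_not_contains {ν : Type} (d : PySem.Dict (List Char) ν) (k : List Char) (dflt : ν)
    (hc : d.contains k = false) : d.getD k dflt = dflt := by
  rw [PySem.Dict.getD, (PySem.Dict.get?_eq_none_iff_contains d k).mpr hc]
  rfl

theorem pvFoldl_modify_items (r : List (List Char)) (m : String) :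
    ∀ (d : PySem.Dict (List Char) (PySem.Set String)),
    r.Nodup → (d.items.map Prod.fst).Nodup →
    (r.foldl (fun d w => d.modify w PySem.Set.empty (fun s => PySem.Set.add s m)) d).items
      = d.items.map (fun kv => if kv.1 ∈ r then (kv.1, PySem.Set.add kv.2 m) else kv)
        ++ (r.filter (fun w => !d.contains w)).map
            (fun w => (w, PySem.Set.add PySem.Set.empty m)) := by
  induction r with
  | nil =>
    intro d _ _
    simp
  | cons w r ih =>
    intro d hr hk
    obtain ⟨hw, hr'⟩ := List.nodup_cons.mp hr
    rw [List.foldl_cons]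
    set v' := PySem.Set.add (d.getD w PySem.Set.empty) m with hv'
    have hmod : d.modify w PySem.Set.empty (fun s => PySem.Set.add s m) = d.insert w v' := rfl
    rw [hmod]
    by_cases hc : d.contains w = true
    · -- in-place update
      have hins : (d.insert w v').items
          = d.items.map (fun p => if p.1 == w then (w, v') else p) := by
        rw [PySem.Dict.insert, if_pos hc]
      have hkeys : ((d.insert w v').items.map Prod.fst) = d.items.map Prod.fst := by
        rw [hins, List.map_map]
        apply List.map_congr_left
        intro p _
        by_cases h : p.1 = w <;> simp [h]
      rw [ih _ hr' (by rw [hkeys]; exact hk)]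
      congr 1
      · -- the mapped part
        rw [hins, List.map_map]
        apply List.map_congr_left
        intro p hp
        by_cases h : p.1 = w
        · have hv : d.getD w PySem.Set.empty = p.2 := by
            rw [← h]
            exact pvGetD_of_mem d p.1 p.2 _ hk (by simpa using hp)
          simp only [Function.comp, h, beq_self_eq_true, if_pos]
          rw [if_neg hw, hv', hv, if_pos (List.mem_cons_self : w ∈ w :: r)]
        · simp only [Function.comp, if_neg (fun hh => h (by simpa using hh) : ¬((p.1 == w) = true))]
          have : (p.1 ∈ w :: r) = (p.1 ∈ r) := by simp [List.mem_cons, h]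
          by_cases h2 : p.1 ∈ r <;> simp [h, h2]
      · -- the appended part
        have hfw : (w :: r).filter (fun x => !d.contains x) = r.filter (fun x => !d.contains x) := by
          rw [List.filter_cons, hc]
          simp
        rw [hfw]
        congr 1
        apply List.filter_congr
        intro x hx
        have hxw : x ≠ w := fun h => hw (h ▸ hx)
        have hcm := PySem.Dict.contains_modify d w x PySem.Set.empty (fun s => PySem.Set.add s m)
        rw [hmod] at hcm
        rw [hcm]
        simp [hxw]
    · -- fresh key appended
      have hcf : d.contains w = false := by simpa using hc
      have hins : (d.insert w v').items = d.items ++ [(w, v')] := by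
        rw [PySem.Dict.insert, if_neg (by simp [hcf])]
      have hvempty : v' = PySem.Set.add PySem.Set.empty m := by
        rw [hv', pvGetD_not_contains d w _ hcf]
      have hwkeys : w ∉ d.items.map Prod.fst := by
        intro hmem
        obtain ⟨p, hp, hp1⟩ := List.mem_map.mp hmem
        have : d.contains w = true := by
          rw [PySem.Dict.contains]
          exact List.any_eq_true.mpr ⟨p, hp, by simp [hp1]⟩
        simp [this] at hcf
      have hkeys : ((d.insert w v').items.map Prod.fst).Nodup := by
        rw [hins, List.map_append, List.nodup_append]
        refine ⟨hk, by simp, ?_⟩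
        intro a ha b hb
        simp only [List.map_cons, List.map_nil, List.mem_singleton] at hb
        subst hb
        exact fun hab => hwkeys (hab ▸ ha)
      rw [ih _ hr' hkeys]
      rw [hins, List.map_append]
      have hmap : d.items.map (fun kv => if kv.1 ∈ r then (kv.1, PySem.Set.add kv.2 m) else kv)
          = d.items.map (fun kv => if kv.1 ∈ w :: r then (kv.1, PySem.Set.add kv.2 m) else kv) := by
        apply List.map_congr_left
        intro p hp
        have hpw : p.1 ≠ w := fun h => hwkeys (h ▸ List.mem_map_of_mem hp)
        simp [List.mem_cons, hpw]
      have hsingle : ([(w, v')].map (fun kv => if kv.1 ∈ r then (kv.1, PySem.Set.add kv.2 m) else kv))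
          = [(w, v')] := by simp [hw]
      have hfilt : r.filter (fun x => !(d.insert w v').contains x)
          = r.filter (fun x => !d.contains x) := by
        apply List.filter_congr
        intro x hx
        have hxw : x ≠ w := fun h => hw (h ▸ hx)
        have : (d.insert w v').contains x = d.contains x := by
          have := PySem.Dict.contains_modify d w x PySem.Set.empty (fun s => PySem.Set.add s m)
          rw [hmod] at this
          rw [this]
          simp [hxw]
        rw [this]
      rw [hfilt, ← hmap]
      have hfcons : (w :: r).filter (fun x => !d.contains x)
          = w :: r.filter (fun x => !d.contains x) := by
        rw [List.filter_cons, hcf]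
        simp
      rw [hfcons, hmap]
      simp only [List.map_cons, hsingle]
      rw [List.append_assoc]
      congr 1
      rw [hvempty]
      rfl

theorem pvBit_iff (m b : Nat) : (m &&& (1 <<< b) ≠ 0) ↔ m.testBit b := by
  rw [Nat.one_shiftLeft, Nat.and_two_pow]
  cases h : m.testBit b <;> simp

theorem pvEnumerate_map {α β : Type} (l : List α) (g : α → β) (s : Int) :
    PySem.List.enumerate (l.map g) s
      = (PySem.List.enumerate l s).map (fun p => (p.1, g p.2)) := by
  induction l generalizing s with
  | nil => rfl
  | cons h t ih => simp [PySem.List.enumerate, ih]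

theorem pvEnumerate_nonneg {α : Type} (l : List α) (s : Int) (hs : 0 ≤ s) :
    ∀ p ∈ PySem.List.enumerate l s, 0 ≤ p.1 := by
  induction l generalizing s with
  | nil => simp [PySem.List.enumerate]
  | cons h t ih =>
    intro p hp
    simp only [PySem.List.enumerate, List.mem_cons] at hp
    rcases hp with rfl | hp
    · exact hs
    · exact ih (s + 1) (by omega) p hp

theorem pvSearchB_eq_walkA (lex toks : List (List Char)) (mode : String) (minL maxL : Int)
    (f : Nat) (cur : List Char) (mask : Nat) (used : PySem.Set Int)
    (found : PySem.Set (List Char))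
    (hinv : ∀ j : Int, 0 ≤ j → (PySem.Set.contains used j = true ↔ mask.testBit j.toNat)) :
    pvSearchB lex (toks.map (pvTokenText mode)) (pvPrefixes lex minL maxL) minL maxL f cur used found
      = pvWalkA lex toks mode minL maxL f cur mask found := by
  induction f generalizing cur mask used found with
  | zero => rfl
  | succ f ih =>
    rw [pvSearchB, pvWalkA]
    dsimp only
    split
    · rfl
    · rw [pvEnumerate_map, List.foldl_map]
      apply PySem.List.foldl_congr_mem
      intro acc p hp
      have hp0 : 0 ≤ p.1 := pvEnumerate_nonneg toks 0 le_rfl p hp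
      dsimp only
      by_cases hs : PySem.Set.contains used p.1 = true
      · rw [if_pos hs, if_pos ((pvBit_iff mask p.1.toNat).mpr ((hinv p.1 hp0).mp hs))]
      · rw [if_neg hs, if_neg (fun h => hs ((hinv p.1 hp0).mpr ((pvBit_iff mask p.1.toNat).mp h)))]
        by_cases hbig : maxL < ((cur ++ pvTokenText mode p.2).length : Int)
        · rw [if_pos hbig, if_neg (fun h => absurd h.1 (by omega))]
        · rw [if_neg hbig]
          by_cases hpref : PySem.Set.contains (pvPrefixes lex minL maxL) (cur ++ pvTokenText mode p.2) = true
          · rw [if_pos ⟨by omega, hpref⟩]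
            apply ih
            intro j hj
            have hmem : PySem.Set.contains (PySem.Set.union used [p.1]) j = true ↔ j ∈ used ∨ j = p.1 := by
              rw [PySem.Set.contains, List.contains_iff_mem, PySem.Set.union, PySem.Set.update,
                List.foldl_cons, List.foldl_nil, PySem.Set.mem_add]
            rw [hmem, Nat.testBit_or, Nat.one_shiftLeft, Nat.testBit_two_pow]
            have : (PySem.Set.contains used j = true) ↔ mask.testBit j.toNat := hinv j hj
            rw [PySem.Set.contains, List.contains_iff_mem] at this
            rw [Bool.or_eq_true, ← this, decide_eq_true_iff]
            constructor
            · rintro (h | rfl)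
              · exact Or.inl h
              · exact Or.inr rfl
            · rintro (h | h)
              · exact Or.inl h
              · exact Or.inr (by omega)
          · rw [if_neg (fun h => hpref h.2)]
            rw [pvWalkA_noop lex toks mode minL maxL f _ _ acc (by omega)
              (fun hg => hpref ((pvPrefixes_mem lex minL maxL _).mpr hg))]

theorem pvMain (lexicon wheel_tokens : List String) (min_len max_len : Int) :
    words_from_wheel lexicon wheel_tokens min_len max_len
      = words_from_wheel_alt lexicon wheel_tokens min_len max_len := by
  simp only [words_from_wheel, words_from_wheel_alt]
  set lex := lexicon.map String.toList with hlex
  set toks := wheel_tokens.map String.toList with htoks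
  set n := toks.length + 1 with hn
  have hinv0 : ∀ j : Int, 0 ≤ j → (PySem.Set.contains ([] : PySem.Set Int) j = true ↔ (0 : Nat).testBit j.toNat) := by
    intro j _
    simp [PySem.Set.contains]
  -- the two pruned searches compute exactly A's two walks
  have hFtexts : toks.map (pvTokenText "forward") = toks := by
    have : ∀ t, pvTokenText "forward" t = t := by
      intro t; simp [pvTokenText]
    simp [List.map_congr_left (fun t _ => this t)]
  have hRtexts : toks.map pvRevText = toks.map (pvTokenText "reverse") := by
    apply List.map_congr_left
    intro t _
    simp [pvRevText, pvTokenText]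
  have hF := pvSearchB_eq_walkA lex toks "forward" min_len max_len n [] 0 [] [] hinv0
  rw [hFtexts] at hF
  have hR := pvSearchB_eq_walkA lex toks "reverse" min_len max_len n [] 0 [] [] hinv0
  rw [← hRtexts] at hR
  rw [hF, hR]
  set fF := pvWalkA lex toks "forward" min_len max_len n [] 0 [] with hfF
  set fR := pvWalkA lex toks "reverse" min_len max_len n [] 0 [] with hfR
  have hnF : fF.Nodup := pvWalkA_nodup _ _ _ _ _ _ _ _ _ List.nodup_nil
  have hnR : fR.Nodup := pvWalkA_nodup _ _ _ _ _ _ _ _ _ List.nodup_nil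
  -- A's dict after the "forward" pass
  simp only [List.foldl_cons, List.foldl_nil]
  have hempty : ∀ w : List Char, (PySem.Dict.empty : PySem.Dict (List Char) (PySem.Set String)).contains w = false := by
    intro w; rfl
  set d1 := fF.foldl (fun d w => d.modify w PySem.Set.empty (fun s => PySem.Set.add s "forward"))
      (PySem.Dict.empty : PySem.Dict (List Char) (PySem.Set String)) with hd1
  have hd1items : d1.items = fF.map (fun w => (w, PySem.Set.add PySem.Set.empty "forward")) := by
    rw [hd1, pvFoldl_modify_items fF "forward" PySem.Dict.empty hnF (by simp [PySem.Dict.empty])]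
    have h1 : (PySem.Dict.empty : PySem.Dict (List Char) (PySem.Set String)).items = [] := rfl
    rw [h1]
    simp only [List.map_nil, List.nil_append]
    congr 1
    apply List.filter_eq_self.mpr
    intro w _
    rw [hempty w]
    rfl
  have hsc : ∀ (s : PySem.Set (List Char)) (x : List Char), (PySem.Set.contains s x = true) ↔ x ∈ s :=
    fun _ _ => List.contains_iff_mem
  have hd1keys : (d1.items.map Prod.fst).Nodup := by
    rw [hd1items, List.map_map]
    have : List.map (Prod.fst ∘ fun w => (w, PySem.Set.add PySem.Set.empty "forward")) fF
        = List.map id fF := List.map_congr_left (fun a _ => rfl)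
    rw [this, List.map_id]
    exact hnF
  have hd1contains : ∀ x, d1.contains x = PySem.Set.contains fF x := by
    intro x
    rw [PySem.Dict.contains, hd1items]
    rw [List.any_map]
    cases hx : PySem.Set.contains fF x
    · apply List.any_eq_false.mpr
      intro w hw
      simp only [Function.comp]
      intro hbeq
      have hxm : x ∈ fF := (eq_of_beq hbeq) ▸ hw
      rw [(hsc fF x).mpr hxm] at hx
      cases hx
    · apply List.any_eq_true.mpr
      exact ⟨x, (hsc fF x).mp hx, by simp⟩
  -- A's dict after the "reverse" pass
  rw [pvFoldl_modify_items fR "reverse" d1 hnR hd1keys, hd1items]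
  -- B's union
  rw [pvUnion_eq_append fF fR hnR, List.map_append, List.map_append, List.map_map, List.map_map, List.map_map]
  have hbf : ("forward" == "forward") = true := by decide
  have hbr : ("reverse" == "forward") = false := by decide
  have hfilter : ∀ (w : List Char) (bF bR : Bool), PySem.Set.contains fF w = bF → PySem.Set.contains fR w = bR →
      (["forward", "reverse"].filter (fun m =>
        if m == "forward" then PySem.Set.contains fF w else PySem.Set.contains fR w))
      = (if bF then ["forward"] else []) ++ (if bR then ["reverse"] else []) := by
    intro w bF bR hbF hbR
    cases bF <;> cases bR <;> simp_all
  congr 1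
  · -- entries first found forward
    apply List.map_congr_left
    intro w hw
    simp only [Function.comp]
    by_cases hwR : w ∈ fR
    · rw [if_pos hwR, hfilter w true true ((hsc fF w).mpr hw) ((hsc fR w).mpr hwR)]
      have hval : PySem.Set.add (PySem.Set.add PySem.Set.empty "forward") "reverse"
          = ["forward", "reverse"] := by decide
      rw [hval]
      rfl
    · rw [if_neg hwR]
      have hcR : PySem.Set.contains fR w = false := by
        cases h : PySem.Set.contains fR w
        · rfl
        · exact absurd ((hsc fR w).mp h) hwR
      rw [hfilter w true false ((hsc fF w).mpr hw) hcR]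
      rfl
  · -- entries only found reversed
    have hfilt : fR.filter (fun w => !d1.contains w) = fR.filter (fun w => !PySem.Set.contains fF w) := by
      apply List.filter_congr
      intro x _
      rw [hd1contains x]
    rw [hfilt]
    apply List.map_congr_left
    intro w hw
    obtain ⟨hwR, hwFc⟩ := List.mem_filter.mp hw
    have hwFc' : PySem.Set.contains fF w = false := by simpa using hwFc
    simp only [Function.comp]
    rw [hfilter w false true hwFc' ((hsc fR w).mpr hwR)]
    have hval : PySem.Set.add PySem.Set.empty "reverse" = ["reverse"] := by decide
    rw [hval]
    rfl

-- ===== VERDICT (by name: the statement is the Claim_ definition above) =====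
theorem words_from_wheel_spec : Claim_equal_words_from_wheel := by
  intro lexicon wheel_tokens min_len max_len _
  unfold Spec_words_from_wheel
  exact pvMain lexicon wheel_tokens min_len max_len
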